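-- pv_equiv track=rewrite | github.com/minus9d/programming_contest_archive | abc/154/e/e.py | solve_slow_2
-- ===== SOURCE A (Python) =====
-- def solve_slow_2(n):
--     ans = 0
--     for i in range(1, n + 1):
--         i_str = str(i)
--         cnt = 0
--         for ch in i_str:
--             cnt += ch != '0'
--         ans += cnt == 2
--     return ans
-- ===== SOURCE B (Python) =====
-- def _cnt(m, k):
--     # how many integers in 0..m have exactly k nonzero decimal digits (0 if m < 0 or k < 0)
--     if k < 0 or m < 0:
--         return 0
--     if m < 10:
--         return 1 if k == 0 else (m if k == 1 else 0)
--     q = m // 10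
--     r = m % 10
--     return _cnt(q, k) + r * _cnt(q, k - 1) + (9 - r) * _cnt(q - 1, k - 1)
--
--
-- def solve_slow_2(n):
--     return _cnt(n, 2)
-- ===== Notes on version B (the rewrite author's own statement) =====
-- stated objective: faster
-- what changed: Replaced A's per-integer scan of 1..n (string-converting every i and counting its nonzero characters) by a combinatorial digit recursion _cnt(m,k) that counts integers in 0..m with exactly k nonzero decimal digits via m//10, m%10.
import Mathlib
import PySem

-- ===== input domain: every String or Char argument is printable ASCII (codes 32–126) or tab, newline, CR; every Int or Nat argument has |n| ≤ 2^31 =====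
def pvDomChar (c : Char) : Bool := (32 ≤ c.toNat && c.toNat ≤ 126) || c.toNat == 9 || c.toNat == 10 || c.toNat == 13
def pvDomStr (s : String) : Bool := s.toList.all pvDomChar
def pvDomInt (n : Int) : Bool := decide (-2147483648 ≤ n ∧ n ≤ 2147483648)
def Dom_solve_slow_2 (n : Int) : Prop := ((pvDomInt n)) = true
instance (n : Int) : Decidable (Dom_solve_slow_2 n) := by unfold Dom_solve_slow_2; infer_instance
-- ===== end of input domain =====

-- B replaces A's scan of every integer 1..n (string-converting each) by a combinatorial
-- digit recursion counting the integers 0..m with exactly k nonzero decimal digits.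

-- ===== PORT A =====
def solve_slow_2 (n : Int) : Int :=
  (PySem.List.pyRange 1 (n + 1) 1).foldl
    (fun ans i =>
      let i_str := PySem.Int.toStr i
      let cnt := i_str.toList.foldl (fun c ch => c + (if ch ≠ '0' then 1 else 0)) (0 : Int)
      ans + (if cnt = 2 then 1 else 0))
    0

-- ===== PORT B =====
-- _cnt of Source B: how many integers in 0..m have exactly k nonzero decimal digits
def cntB (m k : Int) : Int :=
  if k < 0 ∨ m < 0 then 0
  else if m < 10 then (if k = 0 then 1 else if k = 1 then m else 0)
  else
    cntB (PySem.Int.floordiv m 10) k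
      + (PySem.Int.mod m 10) * cntB (PySem.Int.floordiv m 10) (k - 1)
      + (9 - PySem.Int.mod m 10) * cntB (PySem.Int.floordiv m 10 - 1) (k - 1)
termination_by m.toNat
decreasing_by
  all_goals rw [PySem.Int.floordiv_eq_ediv_of_pos (by omega : (0:Int) < 10)]; omega

def solve_slow_2_alt (n : Int) : Int := cntB n 2

-- ===== PRECONDITION & SPEC =====
def Spec_solve_slow_2 (n : Int) (out : Int) : Prop := out = solve_slow_2_alt n
instance (n : Int) (out : Int) : Decidable (Spec_solve_slow_2 n out) := by unfold Spec_solve_slow_2; infer_instance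

-- ===== CLAIM (what is proved, stated in full; the proofs are below) =====
def Claim_equal_solve_slow_2 : Prop := ∀ (n : Int), Dom_solve_slow_2 n → Spec_solve_slow_2 n (solve_slow_2 n)

-- ===== LEMMAS AND PROOFS =====

-- number of nonzero decimal digits of a natural number (0 for 0)
def nzNat (m : Nat) : Int :=
  if m = 0 then 0 else (if m % 10 = 0 then 0 else 1) + nzNat (m / 10)
termination_by m
decreasing_by omega

theorem nzNat_nonneg (m : Nat) : 0 ≤ nzNat m := by
  induction m using Nat.strong_induction_on with
  | _ m ih =>
    rw [nzNat]
    by_cases h : m = 0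
    · simp [h]
    · rw [if_neg h]
      have := ih (m / 10) (by omega)
      by_cases h2 : m % 10 = 0 <;> simp [h2] <;> omega

theorem foldl_ch_init (l : List Char) (a : Int) :
    l.foldl (fun c ch => c + (if ch ≠ '0' then 1 else 0)) a
      = a + l.foldl (fun c ch => c + (if ch ≠ '0' then 1 else 0)) 0 := by
  induction l generalizing a with
  | nil => simp
  | cons x xs ih =>
    simp only [List.foldl_cons]
    rw [ih, ih (0 + _)]
    ring

theorem ch_digitChar (d : Nat) (hd : d < 10) :
    (if Nat.digitChar d ≠ '0' then (1 : Int) else 0) = (if d = 0 then 0 else 1) := by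
  interval_cases d <;> decide

theorem foldl_toDigitsCore (fuel : Nat) :
    ∀ (n : Nat) (ds : List Char), n < fuel →
      (Nat.toDigitsCore 10 fuel n ds).foldl (fun c ch => c + (if ch ≠ '0' then 1 else 0)) 0
        = nzNat n + ds.foldl (fun c ch => c + (if ch ≠ '0' then 1 else 0)) 0 := by
  induction fuel with
  | zero => intro n ds h; omega
  | succ f ih =>
    intro n ds h
    rw [Nat.toDigitsCore]
    by_cases hq : n / 10 = 0
    · rw [if_pos hq, List.foldl_cons, foldl_ch_init]
      show 0 + (if Nat.digitChar (n % 10) ≠ '0' then (1:Int) else 0) + _ = _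
      rw [ch_digitChar (n % 10) (by omega), nzNat]
      by_cases hn : n = 0
      · simp [hn]
      · rw [if_neg hn, hq, nzNat, if_pos rfl, if_neg (by omega : ¬ n % 10 = 0)]
        ring
    · rw [if_neg hq, ih (n / 10) _ (by omega), List.foldl_cons, foldl_ch_init]
      show _ + (0 + (if Nat.digitChar (n % 10) ≠ '0' then (1:Int) else 0) + _) = _
      rw [ch_digitChar (n % 10) (by omega)]
      conv_rhs => rw [nzNat, if_neg (by omega : ¬ n = 0)]
      ring

-- A's per-i inner loop computes nzNat
theorem toStr_count (i : Int) (hi : 0 ≤ i) :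
    (PySem.Int.toStr i).toList.foldl (fun c ch => c + (if ch ≠ '0' then 1 else 0)) 0
      = nzNat i.toNat := by
  rw [PySem.Int.toList_toStr, PySem.Int.toChars, if_neg (by omega), Nat.toDigits,
    foldl_toDigitsCore (i.toNat + 1) i.toNat [] (by omega)]
  simp

-- evaluation lemmas for cntB
theorem cntB_negk (m k : Int) (hk : k < 0) : cntB m k = 0 := by
  rw [cntB, if_pos (Or.inl hk)]

theorem cntB_negm (m k : Int) (hm : m < 0) : cntB m k = 0 := by
  rw [cntB, if_pos (Or.inr hm)]

theorem cntB_base (m k : Int) (h0 : 0 ≤ m) (h10 : m < 10) (hk : 0 ≤ k) :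
    cntB m k = if k = 0 then 1 else if k = 1 then m else 0 := by
  rw [cntB, if_neg (by omega : ¬ (k < 0 ∨ m < 0)), if_pos h10]

theorem cntB_rec (m k : Int) (hm : 10 ≤ m) (hk : 0 ≤ k) :
    cntB m k =
      cntB (PySem.Int.floordiv m 10) k
        + (PySem.Int.mod m 10) * cntB (PySem.Int.floordiv m 10) (k - 1)
        + (9 - PySem.Int.mod m 10) * cntB (PySem.Int.floordiv m 10 - 1) (k - 1) := by
  rw [cntB, if_neg (by omega : ¬ (k < 0 ∨ m < 0)), if_neg (by omega : ¬ m < 10)]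

-- cntB's recursive unfolding holds for every m ≥ 0, including the base range m < 10
theorem cntB_unfold (m : Nat) (k : Int) (hk : 0 ≤ k) :
    cntB (m : Int) k =
      cntB ((m / 10 : Nat) : Int) k
        + ((m % 10 : Nat) : Int) * cntB ((m / 10 : Nat) : Int) (k - 1)
        + (9 - ((m % 10 : Nat) : Int)) * cntB (((m / 10 : Nat) : Int) - 1) (k - 1) := by
  by_cases hm : m < 10
  · have h10 : ((m / 10 : Nat) : Int) = 0 := by omega
    have hr : ((m % 10 : Nat) : Int) = (m : Int) := by omega
    rw [h10, hr, cntB_base (m : Int) k (by omega) (by omega) hk,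
      cntB_base 0 k (by omega) (by omega) hk,
      cntB_negm (0 - 1) (k - 1) (by omega)]
    by_cases hk0 : k = 0
    · rw [hk0, cntB_negk 0 (0 - 1) (by omega)]
      norm_num
    · rw [cntB_base 0 (k - 1) (by omega) (by omega) (by omega)]
      split_ifs <;> omega
  · rw [cntB_rec (m : Int) k (by omega) hk]
    have hq : PySem.Int.floordiv (m : Int) 10 = ((m / 10 : Nat) : Int) := by
      rw [PySem.Int.floordiv_eq_ediv_of_pos (by omega : (0:Int) < 10)]; omega
    have hr : PySem.Int.mod (m : Int) 10 = ((m % 10 : Nat) : Int) := by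
      rw [PySem.Int.mod_eq_emod_of_pos (by omega : (0:Int) < 10)]; omega
    rw [hq, hr]

-- difference step for B's counter: going from m-1 to m adds the indicator of nzNat m = k
theorem cntB_step : ∀ (m : Nat), 1 ≤ m → ∀ (k : Int),
    cntB (m : Int) k = cntB ((m : Int) - 1) k + (if nzNat m = k then 1 else 0) := by
  intro m
  induction m using Nat.strong_induction_on with
  | _ m ih =>
    intro hm k
    by_cases hk : k < 0
    · rw [cntB_negk _ k hk, cntB_negk _ k hk,
        if_neg (by have := nzNat_nonneg m; omega : ¬ nzNat m = k)]
      ring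
    have hknn : 0 ≤ k := by omega
    have hm1 : ((m : Int) - 1) = ((m - 1 : Nat) : Int) := by omega
    by_cases hsmall : m < 10
    · have hnz : nzNat m = 1 := by
        rw [nzNat, if_neg (by omega), (by omega : m % 10 = m), (by omega : m / 10 = 0),
          if_neg (by omega), nzNat]
        norm_num
      rw [hnz, hm1, cntB_base (m : Int) k (by omega) (by omega) hknn,
        cntB_base ((m - 1 : Nat) : Int) k (by omega) (by omega) hknn]
      by_cases hk0 : k = 0
      · rw [hk0]; norm_num
      · rw [if_neg hk0, if_neg hk0]
        by_cases hk1 : k = 1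
        · rw [if_pos hk1, if_pos (by omega : (1:Int) = k)]; omega
        · rw [if_neg hk1, if_neg hk1, if_neg (by omega : ¬ (1:Int) = k)]; ring
    · -- m ≥ 10
      have hq1 : 1 ≤ m / 10 := by omega
      have hqlt : m / 10 < m := by omega
      rw [cntB_unfold m k hknn, hm1, cntB_unfold (m - 1) k hknn]
      have hnzm : nzNat m = (if m % 10 = 0 then 0 else 1) + nzNat (m / 10) := by
        rw [nzNat, if_neg (by omega)]
      by_cases hr : m % 10 = 0
      · -- last digit 0: (m-1)/10 = m/10 - 1, (m-1)%10 = 9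
        have e1 : ((m - 1) / 10 : Nat) = m / 10 - 1 := by omega
        have e2 : (((m - 1) % 10 : Nat) : Int) = 9 := by omega
        have e3 : ((m / 10 - 1 : Nat) : Int) = ((m / 10 : Nat) : Int) - 1 := by omega
        have e4 : ((m % 10 : Nat) : Int) = 0 := by omega
        rw [e1, e2, e3, e4, hnzm, if_pos hr, ih (m / 10) hqlt hq1 k]
        by_cases hh : nzNat (m / 10) = k
        · rw [if_pos hh, if_pos (by omega : 0 + nzNat (m / 10) = k)]; ring
        · rw [if_neg hh, if_neg (by omega : ¬ 0 + nzNat (m / 10) = k)]; ring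
      · -- last digit ≥ 1: (m-1)/10 = m/10, (m-1)%10 = m%10 - 1
        have e1 : ((m - 1) / 10 : Nat) = m / 10 := by omega
        have e2 : (((m - 1) % 10 : Nat) : Int) = ((m % 10 : Nat) : Int) - 1 := by omega
        rw [e1, e2, hnzm, if_neg hr, ih (m / 10) hqlt hq1 (k - 1)]
        by_cases hh : nzNat (m / 10) = k - 1
        · rw [if_pos hh, if_pos (by omega : 1 + nzNat (m / 10) = k)]; ring
        · rw [if_neg hh, if_neg (by omega : ¬ 1 + nzNat (m / 10) = k)]; ring

-- A's fold, unrolled one step at the top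
theorem A_step (n : Int) (h : 1 ≤ n) :
    solve_slow_2 n = solve_slow_2 (n - 1) + (if nzNat n.toNat = 2 then 1 else 0) := by
  show (PySem.List.pyRange 1 (n + 1) 1).foldl _ 0 = _
  rw [PySem.List.pyRange_one_succ_right h, List.foldl_append]
  simp only [List.foldl_cons, List.foldl_nil]
  rw [toStr_count n (by omega)]
  unfold solve_slow_2
  rw [(by ring : (n - 1) + 1 = n)]

theorem main_nat (m : Nat) : solve_slow_2 (m : Int) = cntB (m : Int) 2 := by
  induction m with
  | zero =>
    show (PySem.List.pyRange 1 (0 + 1) 1).foldl _ 0 = _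
    rw [PySem.List.pyRange_one_eq_nil (by omega), cntB]
    norm_num
  | succ m ih =>
    have h1 : (1 : Int) ≤ ((m + 1 : Nat) : Int) := by omega
    rw [A_step _ h1, cntB_step (m + 1) (by omega) 2,
      (by omega : ((m + 1 : Nat) : Int) - 1 = (m : Int)), ih,
      (by omega : ((m + 1 : Nat) : Int).toNat = m + 1)]

-- ===== VERDICT (by name: the statement is the Claim_ definition above) =====
theorem solve_slow_2_spec : Claim_equal_solve_slow_2 := by
  intro n _
  show solve_slow_2 n = solve_slow_2_alt n
  unfold solve_slow_2_alt
  by_cases hn : n ≤ 0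
  · show (PySem.List.pyRange 1 (n + 1) 1).foldl _ 0 = _
    rw [PySem.List.pyRange_one_eq_nil (by omega)]
    rcases lt_or_eq_of_le hn with h | h
    · rw [cntB_negm n 2 h]; rfl
    · subst h
      rw [cntB_base 0 2 (by omega) (by omega) (by omega)]
      norm_num
  · rw [(by omega : n = (n.toNat : Int)), main_nat n.toNat]
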